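-- pv_equiv track=rewrite | github.com/jeganpillai/python_reference | p0090_minimum_number_of_chairs.py | Grow_With_Data
-- ===== SOURCE A (Python) =====
-- def Grow_With_Data(s):
--     cnt = 0
--     max_cnt = 0
--     for i in s:
--         if i == 'E':
--             cnt += 1
--         else:
--             cnt -= 1
--         if cnt > max_cnt:
--             max_cnt = cnt
--     return max_cnt
-- ===== SOURCE B (Python) =====
-- def _solve(s):
--     # returns (total balance of s, max prefix balance of s, floored at 0)
--     if not s:
--         return (0, 0)
--     if len(s) == 1:
--         v = 1 if s == 'E' else -1
--         return (v, max(0, v))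
--     m = len(s) // 2
--     tl, ml = _solve(s[:m])
--     tr, mr = _solve(s[m:])
--     return (tl + tr, max(ml, tl + mr))
--
-- def Grow_With_Data(s):
--     return _solve(s)[1]
-- ===== Notes on version B (the rewrite author's own statement) =====
-- stated objective: alternative
-- what changed: Replaces A's single left-to-right fused scan with a divide-and-conquer recursion: each half returns (total balance, max prefix balance floored at 0) and the halves are combined as (tl+tr, max(ml, tl+mr)).
import Mathlib
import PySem

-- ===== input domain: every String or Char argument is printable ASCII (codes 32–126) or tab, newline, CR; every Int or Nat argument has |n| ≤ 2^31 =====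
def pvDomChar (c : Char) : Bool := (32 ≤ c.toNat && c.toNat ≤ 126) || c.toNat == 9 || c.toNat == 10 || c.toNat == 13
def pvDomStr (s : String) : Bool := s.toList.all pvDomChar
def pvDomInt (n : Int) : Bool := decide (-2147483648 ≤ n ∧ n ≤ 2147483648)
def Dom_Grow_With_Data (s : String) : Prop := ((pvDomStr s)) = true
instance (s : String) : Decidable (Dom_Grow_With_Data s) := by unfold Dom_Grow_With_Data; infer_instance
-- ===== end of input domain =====

-- B replaces A's single left-to-right scan with a divide-and-conquer recursion combining
-- (total balance, max prefix balance floored at 0) of the two halves; objective: alternative.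

-- ===== PORT A =====
-- A's for-loop over the characters, carrying (cnt, max_cnt)
def gwLoopA : List Char → Int → Int → Int
  | [], _, maxCnt => maxCnt
  | i :: rest, cnt, maxCnt =>
    let cnt' := if i = 'E' then cnt + 1 else cnt - 1
    gwLoopA rest cnt' (if cnt' > maxCnt then cnt' else maxCnt)

def Grow_With_Data (s : String) : Int := gwLoopA s.toList 0 0

-- ===== PORT B =====
-- Source B's _solve: split in half, recurse, combine (tl+tr, max(ml, tl+mr))
def gwSolve (l : List Char) : Int × Int :=
  if _h0 : l = [] then (0, 0)
  else if _h1 : l.length = 1 then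
    let v : Int := if l = ['E'] then 1 else -1
    (v, max 0 v)
  else
    let m := l.length / 2
    let p := gwSolve (l.take m)
    let q := gwSolve (l.drop m)
    (p.1 + q.1, max p.2 (p.1 + q.2))
termination_by l.length
decreasing_by
  · have hl : 0 < l.length := List.length_pos_of_ne_nil _h0
    simp only [List.length_take]; omega
  · have hl : 0 < l.length := List.length_pos_of_ne_nil _h0
    simp only [List.length_drop]; omega

def Grow_With_Data_alt (s : String) : Int := (gwSolve s.toList).2

-- ===== PRECONDITION & SPEC =====
def Spec_Grow_With_Data (s : String) (out : Int) : Prop := out = Grow_With_Data_alt s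
instance (s : String) (out : Int) : Decidable (Spec_Grow_With_Data s out) := by unfold Spec_Grow_With_Data; infer_instance

-- ===== CLAIM (what is proved, stated in full; the proofs are below) =====
def Claim_equal_Grow_With_Data : Prop := ∀ (s : String), Dom_Grow_With_Data s → Spec_Grow_With_Data s (Grow_With_Data s)

-- ===== LEMMAS AND PROOFS =====
-- step value of one character
def gwStep (c : Char) : Int := if c = 'E' then 1 else -1

-- total balance of a list
def gwTotal : List Char → Int
  | [] => 0
  | c :: t => gwStep c + gwTotal t

-- max prefix balance (over all prefixes, including the empty one, hence ≥ 0)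
def gwMp : List Char → Int
  | [] => 0
  | c :: t => max 0 (gwStep c + gwMp t)

theorem gwMp_nonneg (l : List Char) : 0 ≤ gwMp l := by
  cases l with
  | nil => exact le_refl 0
  | cons c t => exact le_max_left 0 _

theorem gwTotal_append (a b : List Char) : gwTotal (a ++ b) = gwTotal a + gwTotal b := by
  induction a with
  | nil => simp [gwTotal]
  | cons c t ih => simp [gwTotal, ih]; ring

theorem gwMp_append (a b : List Char) : gwMp (a ++ b) = max (gwMp a) (gwTotal a + gwMp b) := by
  induction a with
  | nil => simp [gwMp, gwTotal, max_eq_right (gwMp_nonneg b)]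
  | cons c t ih =>
    simp only [List.cons_append, gwMp, gwTotal, ih]
    rw [max_def, max_def, max_def, max_def]
    split_ifs <;> omega

theorem gwSolve_eq (l : List Char) : gwSolve l = (gwTotal l, gwMp l) := by
  induction l using gwSolve.induct with
  | case1 => simp [gwSolve, gwTotal, gwMp]
  | case2 l hne h1 =>
    match l, hne, h1 with
    | [c], _, _ =>
      rw [gwSolve]
      simp only [dif_neg (by simp : ¬([c] : List Char) = [])]
      by_cases hc : c = 'E' <;> simp [hc, gwTotal, gwMp, gwStep]
  | case3 l hne h1 m ihl ihr =>
    rw [gwSolve, dif_neg hne, dif_neg h1]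
    have ihl' : gwSolve (List.take (l.length / 2) l)
        = (gwTotal (List.take (l.length / 2) l), gwMp (List.take (l.length / 2) l)) := ihl
    have ihr' : gwSolve (List.drop (l.length / 2) l)
        = (gwTotal (List.drop (l.length / 2) l), gwMp (List.drop (l.length / 2) l)) := ihr
    simp only [ihl', ihr']
    have h := List.take_append_drop (l.length / 2) l
    conv_rhs => rw [← h]
    rw [gwTotal_append, gwMp_append]

theorem gwLoopA_eq (l : List Char) (cnt m : Int) (h : cnt ≤ m) :
    gwLoopA l cnt m = max m (cnt + gwMp l) := by
  induction l generalizing cnt m with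
  | nil => simp [gwLoopA, gwMp]; omega
  | cons c t ih =>
    simp only [gwLoopA, gwMp]
    have hstep : (if c = 'E' then cnt + 1 else cnt - 1) = cnt + gwStep c := by
      simp [gwStep]; split <;> ring
    rw [hstep]
    have hmp := gwMp_nonneg t
    rw [ih _ _ (by split_ifs <;> omega)]
    simp only [max_def]
    split_ifs <;> omega

-- ===== VERDICT (by name: the statement is the Claim_ definition above) =====
theorem Grow_With_Data_spec : Claim_equal_Grow_With_Data := by
  intro s _
  show Grow_With_Data s = Grow_With_Data_alt s
  unfold Grow_With_Data Grow_With_Data_alt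
  rw [gwLoopA_eq _ 0 0 (le_refl 0), gwSolve_eq]
  simp [max_eq_right (gwMp_nonneg s.toList)]
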